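-- pv_equiv track=rewrite | github.com/WallerTsai/OJ-Solution | leetcode-py/杂项/No3638.py | maxBalancedShipments
-- ===== SOURCE A (Python) =====
-- from typing import List
--
-- def maxBalancedShipments(weight: List[int]) -> int:
--     ans = 0
--     tail = weight[-1]
--     for i in range(len(weight) - 2, -1 ,-1):
--         if weight[i] > tail:
--             ans += 1
--             if i:
--                 tail = weight[i - 1]
--         else:
--             tail = weight[i]
--     return ans
-- ===== SOURCE B (Python) =====
-- # Canonical forward greedy: one left-to-right pass tracking the current
-- # segment's maximum (None = segment empty); a weight strictly below that
-- # maximum closes a balanced shipment. Returns 0 on an empty list (A raises).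
-- def maxBalancedShipments(weight):
--     ans = 0
--     mx = None
--     for w in weight:
--         if mx is not None and w < mx:
--             ans += 1
--             mx = None
--         else:
--             mx = w
--     return ans
-- ===== Notes on version B (the rewrite author's own statement) =====
-- stated objective: alternative
-- what changed: Replaces A's backward index scan with tail lookahead and skip-resets by the canonical forward greedy: one left-to-right pass keeping the current segment's maximum and cutting whenever an element drops below it.
import Mathlib
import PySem

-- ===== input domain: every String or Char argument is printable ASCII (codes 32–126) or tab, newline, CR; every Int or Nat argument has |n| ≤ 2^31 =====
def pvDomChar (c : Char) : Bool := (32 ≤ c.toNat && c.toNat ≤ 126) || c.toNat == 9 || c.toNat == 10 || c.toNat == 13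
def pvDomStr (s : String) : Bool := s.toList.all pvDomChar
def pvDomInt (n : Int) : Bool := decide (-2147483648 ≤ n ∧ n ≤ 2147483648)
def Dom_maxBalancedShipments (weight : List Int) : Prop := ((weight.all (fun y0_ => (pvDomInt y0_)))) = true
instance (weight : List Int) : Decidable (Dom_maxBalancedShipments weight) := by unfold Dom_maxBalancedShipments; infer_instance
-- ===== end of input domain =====

-- B replaces A's backward index scan (with tail lookahead) by the canonical
-- forward greedy over segment maxima; equal on every non-empty list, B returns 0 where A raises.

-- ===== PORT A =====
-- one loop iteration of A: i is the current index, s = (ans, tail)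
def stepA (weight : List Int) (s : Int × Int) (i : Int) : Int × Int :=
  match PySem.List.pyGet? weight i with
  | none => s          -- unreachable: i ranges over valid indices of weight
  | some wi =>
    if wi > s.2 then
      (s.1 + 1,
        if i ≠ 0 then
          match PySem.List.pyGet? weight (i - 1) with
          | some v => v
          | none => s.2   -- unreachable: 1 ≤ i
        else s.2)
    else (s.1, wi)

def maxBalancedShipments (weight : List Int) : Int :=
  match PySem.List.pyGet? weight (-1) with
  | none => 0          -- Python raises IndexError here (empty list); outside Pre_
  | some t0 =>
    ((PySem.List.pyRange ((weight.length : Int) - 2) (-1) (-1)).foldl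
      (stepA weight) (0, t0)).1

-- ===== PORT B =====
-- one loop iteration of B: s = (ans, mx); mx = none ↔ Python's mx is None
def stepB (s : Int × Option Int) (w : Int) : Int × Option Int :=
  match s.2 with
  | some mx => if w < mx then (s.1 + 1, none) else (s.1, some w)
  | none => (s.1, some w)

def maxBalancedShipments_alt (weight : List Int) : Int :=
  (weight.foldl stepB (0, none)).1

-- ===== PRECONDITION & SPEC =====
-- Pre_ excludes exactly the empty list, on which A raises IndexError (weight[-1]).
def Pre_maxBalancedShipments (weight : List Int) : Prop := weight ≠ []
instance (weight : List Int) : Decidable (Pre_maxBalancedShipments weight) := by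
  unfold Pre_maxBalancedShipments; infer_instance

def pvWitness_maxBalancedShipments : List Int := [3, 1, 2]

def Spec_maxBalancedShipments (weight : List Int) (out : Int) : Prop := out = maxBalancedShipments_alt weight
instance (weight : List Int) (out : Int) : Decidable (Spec_maxBalancedShipments weight out) := by unfold Spec_maxBalancedShipments; infer_instance

-- ===== CLAIM (what is proved, stated in full; the proofs are below) =====
def Claim_equal_maxBalancedShipments : Prop := ∀ (weight : List Int), Dom_maxBalancedShipments weight → Pre_maxBalancedShipments weight → Spec_maxBalancedShipments weight (maxBalancedShipments weight)

-- ===== LEMMAS AND PROOFS =====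

-- A's loop, accumulator-free, over the reversed prefix: tail parameter t,
-- lookahead = head of the rest (unchanged when the rest is empty, as at i = 0).
def hA (t : Int) : List Int → Int
  | [] => 0
  | x :: xs => if x > t then 1 + hA (xs.head?.getD t) xs else hA x xs

-- B's loop, accumulator-free
def gB : Option Int → List Int → Int
  | _, [] => 0
  | none, w :: ws => gB (some w) ws
  | some m, w :: ws => if w < m then 1 + gB none ws else gB (some w) ws

lemma foldB_fst (l : List Int) : ∀ (a : Int) (o : Option Int),
    (l.foldl stepB (a, o)).1 = a + gB o l := by
  induction l with
  | nil => intro a o; simp [gB]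
  | cons w ws ih =>
    intro a o
    cases o with
    | none => simp [List.foldl_cons, stepB, gB, ih]
    | some m =>
      by_cases h : w < m <;> simp [List.foldl_cons, stepB, gB, h, ih] <;> ring

-- descending Python range: range(i, -1, -1) is empty for i < 0
lemma pyRange_desc_nil (i : Int) (h : i < 0) : PySem.List.pyRange i (-1) (-1) = [] := by
  simp [PySem.List.pyRange, show ¬((-1:Int) < i) by omega]

-- range(m, -1, -1) = m :: range(m-1, -1, -1)
lemma pyRange_desc_cons (m : Nat) :
    PySem.List.pyRange (m : Int) (-1) (-1)
      = (m : Int) :: PySem.List.pyRange ((m : Int) - 1) (-1) (-1) := by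
  cases m with
  | zero =>
    rw [show ((0:Nat):Int) - 1 = -1 by norm_num, pyRange_desc_nil (-1) (by norm_num)]
    simp [PySem.List.pyRange]
  | succ j =>
    simp only [PySem.List.pyRange, if_neg (show ¬((-1:Int) = 0) by norm_num),
      if_neg (show ¬((0:Int) < -1) by norm_num),
      if_pos (show (-1:Int) < ((j+1 : Nat):Int) by push_cast; omega),
      if_pos (show (-1:Int) < ((j+1 : Nat):Int) - 1 by push_cast; omega)]
    rw [show ((((j+1 : Nat):Int)) - -1 + - -1 - 1) / - -1 = ((j:Int) + 2) by push_cast; ring_nf; omega,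
        show ((((j+1 : Nat):Int)) - 1 - -1 + - -1 - 1) / - -1 = ((j:Int) + 1) by push_cast; ring_nf; omega]
    rw [show ((j:Int)+2).toNat = j + 2 by omega, show ((j:Int)+1).toNat = j + 1 by omega]
    rw [show j + 2 = (j+1) + 1 from rfl, List.range_succ_eq_map, List.map_cons, List.map_map]
    refine List.cons_eq_cons.mpr ⟨by push_cast; ring, ?_⟩
    apply List.map_congr_left
    intro k _
    simp only [Function.comp_apply]
    push_cast
    ring

-- (take (m+1) l).reverse = l[m] :: (take m l).reverse
lemma reverse_take_succ (l : List Int) (m : Nat) (h : m < l.length) :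
    (l.take (m + 1)).reverse = l[m] :: (l.take m).reverse := by
  rw [List.take_add_one]
  simp [List.getElem?_eq_getElem h]

-- A's fold over range(m-1, -1, -1) computes hA on the reversed m-prefix
lemma foldA_fst (l : List Int) : ∀ (m : Nat), m < l.length → ∀ (a t : Int),
    ((PySem.List.pyRange ((m : Int) - 1) (-1) (-1)).foldl (stepA l) (a, t)).1
      = a + hA t ((l.take m).reverse) := by
  intro m
  induction m with
  | zero =>
    intro _ a t
    rw [show ((0 : Nat) : Int) - 1 = -1 by norm_num, pyRange_desc_nil (-1) (by norm_num)]
    simp [hA]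
  | succ j ih =>
    intro hlt a t
    have hj : j < l.length := by omega
    rw [show ((j + 1 : Nat) : Int) - 1 = (j : Int) by push_cast; ring,
        pyRange_desc_cons j, List.foldl_cons]
    rw [reverse_take_succ l j hj]
    have hget : PySem.List.pyGet? l (j : Int) = some l[j] := by
      simp [PySem.List.pyGet?_natCast, List.getElem?_eq_getElem hj]
    cases j with
    | zero =>
      rw [show ((0:Nat):Int) - 1 = -1 by norm_num, pyRange_desc_nil (-1) (by norm_num),
          List.foldl_nil]
      by_cases hc : l[0] > t <;>
        simp [stepA, PySem.List.pyGet?_zero, List.getElem?_eq_getElem hj, hA, hc]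
    | succ k =>
      have hk : k < l.length := by omega
      have hhead : ((l.take (k+1)).reverse).head? = some l[k] := by
        rw [reverse_take_succ l k hk]; rfl
      have hget' : PySem.List.pyGet? l (((k+1 : Nat) : Int) - 1) = some l[k] := by
        rw [show ((k + 1 : Nat) : Int) - 1 = (k : Int) by push_cast; ring]
        simp [PySem.List.pyGet?_natCast, List.getElem?_eq_getElem hk]
      by_cases hc : l[k+1] > t
      · simp only [stepA, hget, hget', if_pos hc,
          if_pos (show ((k+1 : Nat) : Int) ≠ 0 by push_cast; omega)]
        rw [ih (by omega)]
        simp only [hA, if_pos hc, hhead, Option.getD_some]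
        ring
      · simp only [stepA, hget, if_neg hc]
        rw [ih (by omega)]
        simp only [hA, if_neg hc]

-- appending x then t with x ≤ t does not change B's count
lemma gB_append_le (q : List Int) : ∀ (s : Option Int) (x t : Int), x ≤ t →
    gB s (q ++ [x, t]) = gB s (q ++ [x]) := by
  induction q with
  | nil =>
    intro s x t hxt
    cases s with
    | none => simp [gB, not_lt.mpr hxt]
    | some m => by_cases h : x < m <;> simp [gB, h, not_lt.mpr hxt]
  | cons w q ih =>
    intro s x t hxt
    cases s with
    | none => simpa [gB] using ih (some w) x t hxt
    | some m =>
      by_cases h : w < m <;> simp [gB, h, ih _ x t hxt]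

-- appending x then t with t < x adds exactly one cut
lemma gB_append_lt (q : List Int) : ∀ (s : Option Int) (x t : Int), t < x →
    gB s (q ++ [x, t]) = gB s q + 1 := by
  induction q with
  | nil =>
    intro s x t htx
    cases s with
    | none => simp [gB, htx]
    | some m => by_cases h : x < m <;> simp [gB, h, htx]
  | cons w q ih =>
    intro s x t htx
    cases s with
    | none => simpa [gB] using ih (some w) x t htx
    | some m =>
      by_cases h : w < m <;> simp [gB, h, ih _ x t htx] <;> ring

-- main bridge: A's backward pass equals B's forward pass
lemma hA_eq_gB (r : List Int) : ∀ (t : Int), hA t r = gB none (r.reverse ++ [t]) := by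
  induction r with
  | nil => intro t; simp [hA, gB]
  | cons x xs ih =>
    intro t
    by_cases hc : x > t
    · rw [show (x :: xs).reverse ++ [t] = xs.reverse ++ [x, t] by simp]
      rw [gB_append_lt xs.reverse none x t hc]
      simp only [hA, if_pos hc]
      cases xs with
      | nil => simp [hA, gB]
      | cons y ys =>
        have := ih y
        rw [show (y :: ys).reverse ++ [y] = ys.reverse ++ [y, y] by simp] at this
        rw [gB_append_le ys.reverse none y y le_rfl] at this
        simp only [List.head?_cons, Option.getD_some]
        rw [this, List.reverse_cons, add_comm]
    · rw [show (x :: xs).reverse ++ [t] = (xs.reverse ++ [x]) ++ [t] by simp]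
      rw [show (xs.reverse ++ [x]) ++ [t] = xs.reverse ++ [x, t] by simp]
      rw [gB_append_le xs.reverse none x t (not_lt.mp hc)]
      simp only [hA, if_neg hc]
      exact ih x

-- ===== VERDICT (by name: the statement is the Claim_ definition above) =====
theorem maxBalancedShipments_spec : Claim_equal_maxBalancedShipments := by
  intro weight _ hpre
  unfold Spec_maxBalancedShipments maxBalancedShipments maxBalancedShipments_alt
  unfold Pre_maxBalancedShipments at hpre
  have hlast : PySem.List.pyGet? weight (-1) = some (weight.getLast hpre) := by
    rw [PySem.List.pyGet?_neg_one, List.getLast?_eq_getLast_of_ne_nil hpre]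
  rw [hlast]
  dsimp only
  have hn : 1 ≤ weight.length := List.length_pos_iff.mpr hpre
  have hcast : (weight.length : Int) - 2 = ((weight.length - 1 : Nat) : Int) - 1 := by
    omega
  rw [hcast, foldA_fst weight (weight.length - 1) (by omega), foldB_fst]
  rw [show weight.take (weight.length - 1) = weight.dropLast by
        rw [List.dropLast_eq_take]]
  rw [hA_eq_gB, List.reverse_reverse, List.dropLast_concat_getLast hpre]
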